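-- pv_equiv track=rewrite | github.com/PavelKolev/exercises | dynamic_programming/two_factory_lines.py | factory_lines
-- ===== SOURCE A (Python) =====
-- def factory_lines(A, T, E, X):
-- 	n = len(A[0])
-- 	S = [[0 for j in range(n)] for i in range(2)]
-- 	P = [-1 for j in range(n+1)]
--
-- 	S[0][0] = E[0] + A[0][0]
-- 	S[1][0] = E[1] + A[1][0]
--
-- 	for j in range(1,n):
-- 		for i in range(2):
-- 			same = S[i][j-1]
-- 			diff = S[1-i][j-1] + T[1-i][j]
-- 			S[i][j] = A[i][j] + min( same, diff )
--
-- 	f = min(X[0] + S[0][n-1], X[1] + S[1][n-1])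
--
-- 	# Compute Path
-- 	P[n] = 0 if f == X[0] + S[0][n-1] else 1
--
-- 	for j in reversed(range(1,n)):
-- 		i    = P[j+1]
-- 		P[j] = i if S[i][j] == S[i][j-1] + A[i][j] else 1-i
--
-- 	P[0] = P[1]
--
-- 	return P, f
-- ===== SOURCE B (Python) =====
-- def factory_lines(A, T, E, X):
--     n = len(A[0])
--     # forward pass: keep only the previous column's costs plus a decision table
--     prev0 = E[0] + A[0][0]
--     prev1 = E[1] + A[1][0]
--     ptr = [None]  # ptr[j] = (predecessor line of (0,j), predecessor line of (1,j))
--     for j in range(1, n):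
--         p0 = 0 if prev0 <= prev1 + T[1][j] else 1
--         p1 = 1 if prev1 <= prev0 + T[0][j] else 0
--         cur0 = A[0][j] + (prev0 if p0 == 0 else prev1 + T[1][j])
--         cur1 = A[1][j] + (prev1 if p1 == 1 else prev0 + T[0][j])
--         ptr.append((p0, p1))
--         prev0, prev1 = cur0, cur1
--     c0 = X[0] + prev0
--     c1 = X[1] + prev1
--     f = min(c0, c1)
--     line = 0 if c0 <= c1 else 1
--     P = [0] * (n + 1)
--     P[n] = line
--     for j in range(n - 1, 0, -1):
--         line = ptr[j][line]
--         P[j] = line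
--     P[0] = P[1]
--     return P, f
-- ===== Notes on version B (the rewrite author's own statement) =====
-- stated objective: alternative
-- what changed: B keeps only the previous column's two costs plus a decision table filled during the forward pass, and reconstructs the path by following stored pointers, instead of A's full 2xn cost matrix with the path re-derived backwards from cost comparisons.
import Mathlib
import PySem

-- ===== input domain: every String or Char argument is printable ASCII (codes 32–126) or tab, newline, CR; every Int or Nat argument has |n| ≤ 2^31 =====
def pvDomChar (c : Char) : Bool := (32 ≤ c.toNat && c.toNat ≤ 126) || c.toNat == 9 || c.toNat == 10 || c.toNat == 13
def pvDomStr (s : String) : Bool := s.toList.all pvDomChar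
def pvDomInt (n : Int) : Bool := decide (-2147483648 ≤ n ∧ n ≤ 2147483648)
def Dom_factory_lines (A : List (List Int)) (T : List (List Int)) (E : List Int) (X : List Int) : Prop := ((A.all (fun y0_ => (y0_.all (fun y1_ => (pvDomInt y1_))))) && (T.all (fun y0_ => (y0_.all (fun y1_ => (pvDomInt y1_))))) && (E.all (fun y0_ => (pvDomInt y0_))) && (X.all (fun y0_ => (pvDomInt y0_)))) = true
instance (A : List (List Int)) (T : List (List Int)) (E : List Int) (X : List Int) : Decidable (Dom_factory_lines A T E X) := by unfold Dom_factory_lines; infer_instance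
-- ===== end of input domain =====

-- B replaces A's full 2xn cost matrix + backward cost re-derivation by a forward decision
-- table and pointer-following reconstruction, keeping only the previous column's costs
-- (objective: alternative, same asymptotic cost).

-- shared total accessors (in range on every input admitted by Pre_, where Python does not raise)
def pvMat (M : List (List Int)) (i j : Nat) : Int := (M.getD i []).getD j 0
def pvVec (l : List Int) (i : Nat) : Int := l.getD i 0

-- ===== PORT A =====
-- forward pass building the full cost rows S[0], S[1]
def aLoop (A T : List (List Int)) (n : Nat) (s0 s1 : List Int) (j : Nat) : List Int × List Int :=
  if h : j < n then
    let same0 := pvVec s0 (j-1)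
    let diff0 := pvVec s1 (j-1) + pvMat T 1 j
    let same1 := pvVec s1 (j-1)
    let diff1 := pvVec s0 (j-1) + pvMat T 0 j
    aLoop A T n (s0 ++ [pvMat A 0 j + min same0 diff0]) (s1 ++ [pvMat A 1 j + min same1 diff1]) (j+1)
  else (s0, s1)
termination_by n - j
decreasing_by omega

-- backward pass: P[j] re-derived from the cost rows, j = n-1 down to 1
def aBack (A : List (List Int)) (s0 s1 : List Int) : Nat → Int → List Int → List Int
  | 0, _, acc => acc
  | j+1, i, acc =>
    let si := if i = 0 then s0 else s1
    let ai := if i = 0 then pvMat A 0 (j+1) else pvMat A 1 (j+1)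
    let pj : Int := if pvVec si (j+1) = pvVec si j + ai then i else 1 - i
    aBack A s0 s1 j pj (pj :: acc)

def factory_lines (A : List (List Int)) (T : List (List Int)) (E : List Int) (X : List Int) : List Int × Int :=
  let n := (A.getD 0 []).length
  let s := aLoop A T n [pvVec E 0 + pvMat A 0 0] [pvVec E 1 + pvMat A 1 0] 1
  let f := min (pvVec X 0 + pvVec s.1 (n-1)) (pvVec X 1 + pvVec s.2 (n-1))
  let pn : Int := if f = pvVec X 0 + pvVec s.1 (n-1) then 0 else 1
  let rest := aBack A s.1 s.2 (n-1) pn [pn]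
  (rest.headD pn :: rest, f)

-- ===== PORT B =====
-- forward pass: only the previous column's two costs, plus the decision table ptr
def bLoop (A T : List (List Int)) (n : Nat) (prev0 prev1 : Int) (ptr : List (Int × Int)) (j : Nat) : Int × Int × List (Int × Int) :=
  if h : j < n then
    let p0 : Int := if prev0 ≤ prev1 + pvMat T 1 j then 0 else 1
    let p1 : Int := if prev1 ≤ prev0 + pvMat T 0 j then 1 else 0
    let cur0 := pvMat A 0 j + (if p0 = 0 then prev0 else prev1 + pvMat T 1 j)
    let cur1 := pvMat A 1 j + (if p1 = 1 then prev1 else prev0 + pvMat T 0 j)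
    bLoop A T n cur0 cur1 (ptr ++ [(p0, p1)]) (j+1)
  else (prev0, prev1, ptr)
termination_by n - j
decreasing_by omega

-- path reconstruction by following stored pointers
def bBack (ptr : List (Int × Int)) : Nat → Int → List Int → List Int
  | 0, _, acc => acc
  | j+1, line, acc =>
    let pr := ptr.getD (j+1) (0, 0)
    let line' := if line = 0 then pr.1 else pr.2
    bBack ptr j line' (line' :: acc)

def factory_lines_alt (A : List (List Int)) (T : List (List Int)) (E : List Int) (X : List Int) : List Int × Int :=
  let n := (A.getD 0 []).length
  let r := bLoop A T n (pvVec E 0 + pvMat A 0 0) (pvVec E 1 + pvMat A 1 0) [(0, 0)] 1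
  let c0 := pvVec X 0 + r.1
  let c1 := pvVec X 1 + r.2.1
  let f := min c0 c1
  let line : Int := if c0 ≤ c1 then 0 else 1
  let rest := bBack r.2.2 (n-1) line [line]
  (rest.headD line :: rest, f)

-- ===== PRECONDITION & SPEC =====
-- Pre_: exactly the shapes on which the Python A returns (two cost rows of width n ≥ 1,
-- E and X of length ≥ 2, and — only when n ≥ 2 — two transfer rows of width ≥ n);
-- elsewhere A raises IndexError.
def Pre_factory_lines (A : List (List Int)) (T : List (List Int)) (E : List Int) (X : List Int) : Prop :=
  2 ≤ A.length ∧ 2 ≤ E.length ∧ 2 ≤ X.length ∧ 1 ≤ (A.getD 0 []).length ∧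
  (A.getD 0 []).length ≤ (A.getD 1 []).length ∧
  (2 ≤ (A.getD 0 []).length → 2 ≤ T.length ∧ (A.getD 0 []).length ≤ (T.getD 0 []).length ∧ (A.getD 0 []).length ≤ (T.getD 1 []).length)
instance (A : List (List Int)) (T : List (List Int)) (E : List Int) (X : List Int) : Decidable (Pre_factory_lines A T E X) := by unfold Pre_factory_lines; infer_instance

def pvWitness_factory_lines : List (List Int) × List (List Int) × List Int × List Int :=
  ([[1, 2], [3, 4]], [[1, 1], [1, 1]], [1, 2], [3, 4])

def Spec_factory_lines (A : List (List Int)) (T : List (List Int)) (E : List Int) (X : List Int) (out : List Int × Int) : Prop := out = factory_lines_alt A T E X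
instance (A : List (List Int)) (T : List (List Int)) (E : List Int) (X : List Int) (out : List Int × Int) : Decidable (Spec_factory_lines A T E X out) := by unfold Spec_factory_lines; infer_instance

-- ===== CLAIM (what is proved, stated in full; the proofs are below) =====
def Claim_equal_factory_lines : Prop := ∀ (A : List (List Int)) (T : List (List Int)) (E : List Int) (X : List Int), Dom_factory_lines A T E X → Pre_factory_lines A T E X → Spec_factory_lines A T E X (factory_lines A T E X)

-- ===== LEMMAS AND PROOFS =====

-- reference cost table: Sf j = (S[0][j], S[1][j])
def Sf (A T : List (List Int)) (E : List Int) : Nat → Int × Int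
  | 0 => (pvVec E 0 + pvMat A 0 0, pvVec E 1 + pvMat A 1 0)
  | j+1 =>
    let p := Sf A T E j
    (pvMat A 0 (j+1) + min p.1 (p.2 + pvMat T 1 (j+1)),
     pvMat A 1 (j+1) + min p.2 (p.1 + pvMat T 0 (j+1)))

-- the decision B's forward pass records at column k ≥ 1
def decs (A T : List (List Int)) (E : List Int) (k : Nat) : Int × Int :=
  ((if (Sf A T E (k-1)).1 ≤ (Sf A T E (k-1)).2 + pvMat T 1 k then (0:Int) else 1),
   (if (Sf A T E (k-1)).2 ≤ (Sf A T E (k-1)).1 + pvMat T 0 k then (1:Int) else 0))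

lemma aLoop_spec (A T : List (List Int)) (E : List Int) (n : Nat) :
    ∀ (m j : Nat) (s0 s1 : List Int), n - j = m → 1 ≤ j → s0.length = j → s1.length = j →
    (∀ k, k < j → pvVec s0 k = (Sf A T E k).1 ∧ pvVec s1 k = (Sf A T E k).2) →
    ∀ k, k < max j n →
      pvVec (aLoop A T n s0 s1 j).1 k = (Sf A T E k).1 ∧
      pvVec (aLoop A T n s0 s1 j).2 k = (Sf A T E k).2 := by
  intro m
  induction m with
  | zero =>
    intro j s0 s1 hm hj h0 h1 hv k hk
    rw [aLoop]
    rw [dif_neg (by omega)]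
    exact hv k (by omega)
  | succ m ih =>
    intro j s0 s1 hm hj h0 h1 hv k hk
    rw [aLoop]
    rw [dif_pos (by omega : j < n)]
    obtain ⟨j', rfl⟩ : ∃ j', j = j' + 1 := ⟨j - 1, by omega⟩
    have hvj := hv j' (by omega)
    have hnew : ∀ k, k < j' + 2 →
        pvVec (s0 ++ [pvMat A 0 (j'+1) + min (pvVec s0 (j'+1-1)) (pvVec s1 (j'+1-1) + pvMat T 1 (j'+1))]) k = (Sf A T E k).1 ∧
        pvVec (s1 ++ [pvMat A 1 (j'+1) + min (pvVec s1 (j'+1-1)) (pvVec s0 (j'+1-1) + pvMat T 0 (j'+1))]) k = (Sf A T E k).2 := by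
      intro k hk2
      rcases Nat.lt_or_ge k (j'+1) with hlt | hge
      · constructor
        · rw [pvVec, List.getD_append _ _ _ _ (by omega)]; exact (hv k hlt).1
        · rw [pvVec, List.getD_append _ _ _ _ (by omega)]; exact (hv k hlt).2
      · have hk3 : k = j' + 1 := by omega
        subst hk3
        constructor
        · rw [pvVec, List.getD_append_right _ _ _ _ (by omega)]
          simp only [h0, Nat.sub_self, List.getD]
          simp only [Nat.add_sub_cancel, Sf]
          rw [(hv j' (by omega)).1, (hv j' (by omega)).2]
          rfl
        · rw [pvVec, List.getD_append_right _ _ _ _ (by omega)]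
          simp only [h1, Nat.sub_self, List.getD]
          simp only [Nat.add_sub_cancel, Sf]
          rw [(hv j' (by omega)).1, (hv j' (by omega)).2]
          rfl
    have := ih (j'+2) _ _ (by omega) (by omega) (by simp [h0]) (by simp [h1]) hnew k (by omega)
    exact this

lemma bLoop_spec (A T : List (List Int)) (E : List Int) (n : Nat) :
    ∀ (m j : Nat) (ptr : List (Int × Int)), n - j = m → 1 ≤ j → j ≤ n → ptr.length = j →
    (∀ k, 1 ≤ k → k < j → ptr.getD k (0,0) = decs A T E k) →
    (bLoop A T n (Sf A T E (j-1)).1 (Sf A T E (j-1)).2 ptr j).1 = (Sf A T E (n-1)).1 ∧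
    (bLoop A T n (Sf A T E (j-1)).1 (Sf A T E (j-1)).2 ptr j).2.1 = (Sf A T E (n-1)).2 ∧
    ∀ k, 1 ≤ k → k < n → (bLoop A T n (Sf A T E (j-1)).1 (Sf A T E (j-1)).2 ptr j).2.2.getD k (0,0) = decs A T E k := by
  intro m
  induction m with
  | zero =>
    intro j ptr hm hj hjn hl hp
    rw [bLoop, dif_neg (by omega)]
    have hjn' : j = n := by omega
    subst hjn'
    exact ⟨rfl, rfl, fun k hk1 hk2 => hp k hk1 hk2⟩
  | succ m ih =>
    intro j ptr hm hj hjn hl hp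
    rw [bLoop, dif_pos (by omega : j < n)]
    obtain ⟨j', rfl⟩ : ∃ j', j = j' + 1 := ⟨j - 1, by omega⟩
    simp only [Nat.add_sub_cancel] at *
    -- identify cur0/cur1 with Sf (j'+1) and the appended pair with decs (j'+1)
    have hcur0 : pvMat A 0 (j'+1) + (if (if (Sf A T E j').1 ≤ (Sf A T E j').2 + pvMat T 1 (j'+1) then (0:Int) else 1) = 0 then (Sf A T E j').1 else (Sf A T E j').2 + pvMat T 1 (j'+1)) = (Sf A T E (j'+1)).1 := by
      by_cases h : (Sf A T E j').1 ≤ (Sf A T E j').2 + pvMat T 1 (j'+1)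
      · simp [Sf, h]
      · simp [Sf, h, min_eq_right (le_of_lt (lt_of_not_ge h))]
    have hcur1 : pvMat A 1 (j'+1) + (if (if (Sf A T E j').2 ≤ (Sf A T E j').1 + pvMat T 0 (j'+1) then (1:Int) else 0) = 1 then (Sf A T E j').2 else (Sf A T E j').1 + pvMat T 0 (j'+1)) = (Sf A T E (j'+1)).2 := by
      by_cases h : (Sf A T E j').2 ≤ (Sf A T E j').1 + pvMat T 0 (j'+1)
      · simp [Sf, h]
      · simp [Sf, h, min_eq_right (le_of_lt (lt_of_not_ge h))]
    have hp' : ∀ k, 1 ≤ k → k < j' + 2 →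
        (ptr ++ [((if (Sf A T E j').1 ≤ (Sf A T E j').2 + pvMat T 1 (j'+1) then (0:Int) else 1),
                  (if (Sf A T E j').2 ≤ (Sf A T E j').1 + pvMat T 0 (j'+1) then (1:Int) else 0))]).getD k (0,0) = decs A T E k := by
      intro k hk1 hk2
      rcases Nat.lt_or_ge k (j'+1) with hlt | hge
      · rw [List.getD_append _ _ _ _ (by omega)]; exact hp k hk1 hlt
      · have hk3 : k = j' + 1 := by omega
        subst hk3
        rw [List.getD_append_right _ _ _ _ (by omega)]
        simp only [hl, Nat.sub_self, List.getD]
        simp [decs]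
    have := ih (j'+2) _ (by omega) (by omega) (by omega) (by simp [hl]) hp'
    rw [hcur0, hcur1]
    exact this

lemma back_eq (A : List (List Int)) (s0 s1 : List Int) (ptr : List (Int × Int))
    (T : List (List Int)) (E : List Int) (n : Nat)
    (hs : ∀ k, k < n → pvVec s0 k = (Sf A T E k).1 ∧ pvVec s1 k = (Sf A T E k).2)
    (hptr : ∀ k, 1 ≤ k → k < n → ptr.getD k (0,0) = decs A T E k) :
    ∀ (j : Nat) (i : Int) (acc : List Int), j < n → (i = 0 ∨ i = 1) →
    aBack A s0 s1 j i acc = bBack ptr j i acc := by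
  intro j
  induction j with
  | zero => intro i acc _ _; rfl
  | succ j ih =>
    intro i acc hj hi
    rw [aBack, bBack]
    rw [hptr (j+1) (by omega) hj]
    have hsj := hs j (by omega)
    have hsj1 := hs (j+1) hj
    rcases hi with rfl | rfl
    · simp only [if_true, decs, Nat.add_sub_cancel]
      have hcond : (pvVec s0 (j+1) = pvVec s0 j + pvMat A 0 (j+1)) ↔
          ((Sf A T E j).1 ≤ (Sf A T E j).2 + pvMat T 1 (j+1)) := by
        rw [hsj1.1, hsj.1]
        show (Sf A T E (j+1)).1 = _ ↔ _
        simp only [Sf]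
        constructor
        · intro h
          have : min (Sf A T E j).1 ((Sf A T E j).2 + pvMat T 1 (j+1)) = (Sf A T E j).1 := by omega
          exact min_eq_left_iff.mp this
        · intro h; rw [min_eq_left h]; omega
      by_cases h : (Sf A T E j).1 ≤ (Sf A T E j).2 + pvMat T 1 (j+1)
      · rw [if_pos (hcond.mpr h), if_pos h]
        exact ih 0 _ (by omega) (Or.inl rfl)
      · rw [if_neg (fun hc => h (hcond.mp hc)), if_neg h]
        norm_num
        exact ih 1 _ (by omega) (Or.inr rfl)
    · simp only [if_neg (by norm_num : (1:Int) ≠ 0), decs, Nat.add_sub_cancel]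
      have hcond : (pvVec s1 (j+1) = pvVec s1 j + pvMat A 1 (j+1)) ↔
          ((Sf A T E j).2 ≤ (Sf A T E j).1 + pvMat T 0 (j+1)) := by
        rw [hsj1.2, hsj.2]
        show (Sf A T E (j+1)).2 = _ ↔ _
        simp only [Sf]
        constructor
        · intro h
          have : min (Sf A T E j).2 ((Sf A T E j).1 + pvMat T 0 (j+1)) = (Sf A T E j).2 := by omega
          exact min_eq_left_iff.mp this
        · intro h; rw [min_eq_left h]; omega
      by_cases h : (Sf A T E j).2 ≤ (Sf A T E j).1 + pvMat T 0 (j+1)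
      · rw [if_pos (hcond.mpr h), if_pos h]
        exact ih 1 _ (by omega) (Or.inr rfl)
      · rw [if_neg (fun hc => h (hcond.mp hc)), if_neg h]
        exact ih 0 _ (by omega) (Or.inl rfl)

-- ===== VERDICT (by name: the statement is the Claim_ definition above) =====
theorem factory_lines_spec : Claim_equal_factory_lines := by
  intro A T E X _hdom hpre
  obtain ⟨-, -, -, hn, -, -⟩ := hpre
  unfold Spec_factory_lines factory_lines factory_lines_alt
  set n := (A.getD 0 []).length with hndef
  have hs := aLoop_spec A T E n (n-1) 1 [pvVec E 0 + pvMat A 0 0] [pvVec E 1 + pvMat A 1 0]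
    (by omega) (by omega) rfl rfl
    (by intro k hk; interval_cases k; exact ⟨rfl, rfl⟩)
  have hmax : max 1 n = n := by omega
  rw [hmax] at hs
  have hb := bLoop_spec A T E n (n-1) 1 [(0,0)] (by omega) (by omega) (by omega) rfl
    (by intro k hk1 hk2; omega)
  simp only [Nat.sub_self] at hb
  have hb0 : (Sf A T E 0).1 = pvVec E 0 + pvMat A 0 0 := rfl
  have hb1 : (Sf A T E 0).2 = pvVec E 1 + pvMat A 1 0 := rfl
  rw [hb0, hb1] at hb
  obtain ⟨hbl0, hbl1, hbp⟩ := hb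
  have hsn1 := hs (n-1) (by omega)
  -- final costs agree
  have hc0 : pvVec (aLoop A T n [pvVec E 0 + pvMat A 0 0] [pvVec E 1 + pvMat A 1 0] 1).1 (n-1)
      = (bLoop A T n (pvVec E 0 + pvMat A 0 0) (pvVec E 1 + pvMat A 1 0) [(0,0)] 1).1 := by
    rw [hsn1.1, hbl0]
  have hc1 : pvVec (aLoop A T n [pvVec E 0 + pvMat A 0 0] [pvVec E 1 + pvMat A 1 0] 1).2 (n-1)
      = (bLoop A T n (pvVec E 0 + pvMat A 0 0) (pvVec E 1 + pvMat A 1 0) [(0,0)] 1).2.1 := by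
    rw [hsn1.2, hbl1]
  simp only [hc0, hc1]
  set c0 := pvVec X 0 + (bLoop A T n (pvVec E 0 + pvMat A 0 0) (pvVec E 1 + pvMat A 1 0) [(0,0)] 1).1 with hc0def
  set c1 := pvVec X 1 + (bLoop A T n (pvVec E 0 + pvMat A 0 0) (pvVec E 1 + pvMat A 1 0) [(0,0)] 1).2.1 with hc1def
  have hpn : (if min c0 c1 = c0 then (0:Int) else 1) = (if c0 ≤ c1 then (0:Int) else 1) := by
    by_cases h : c0 ≤ c1
    · rw [if_pos (min_eq_left h), if_pos h]
    · rw [if_neg (by omega : ¬ min c0 c1 = c0), if_neg h]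
  rw [hpn]
  have hback := back_eq A
    (aLoop A T n [pvVec E 0 + pvMat A 0 0] [pvVec E 1 + pvMat A 1 0] 1).1
    (aLoop A T n [pvVec E 0 + pvMat A 0 0] [pvVec E 1 + pvMat A 1 0] 1).2
    (bLoop A T n (pvVec E 0 + pvMat A 0 0) (pvVec E 1 + pvMat A 1 0) [(0,0)] 1).2.2
    T E n hs hbp (n-1) (if c0 ≤ c1 then (0:Int) else 1) [(if c0 ≤ c1 then (0:Int) else 1)]
    (by omega) (by split <;> simp)
  rw [hback]
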